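-- pv_equiv track=rewrite | github.com/MichalRumiancew/the_keymaker | keymaker.py | remove_odd_blocks
-- ===== SOURCE A (Python) =====
-- def remove_odd_blocks(word, block_length):
--     new_word = ""
--
--     word_as_list = list(word)
--     sliced_blocks = [word_as_list[i:i + block_length]
--                      for i in range(0, len(word_as_list), block_length)]
--
--     for index, block in enumerate(sliced_blocks):
--
--         if index % 2 == 0:
--             new_word += "".join(block)
--
--     return new_word
--
--     """
--     >>> remove_odd_blocks('abcdefghijklm', 3)
--     'abcghim'
--     """
--     pass
-- ===== SOURCE B (Python) =====
-- def remove_odd_blocks(word, block_length):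
--     return "".join(word[i:i + block_length]
--                    for i in range(0, len(word), 2 * block_length))
-- ===== Notes on version B (the rewrite author's own statement) =====
-- stated objective: simpler
-- what changed: B strides directly over the even block starts with range(0, len(word), 2*block_length) and joins the slices, eliminating A's full block list, the enumerate, the index%2 branch and the repeated string concatenation.
import Mathlib
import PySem

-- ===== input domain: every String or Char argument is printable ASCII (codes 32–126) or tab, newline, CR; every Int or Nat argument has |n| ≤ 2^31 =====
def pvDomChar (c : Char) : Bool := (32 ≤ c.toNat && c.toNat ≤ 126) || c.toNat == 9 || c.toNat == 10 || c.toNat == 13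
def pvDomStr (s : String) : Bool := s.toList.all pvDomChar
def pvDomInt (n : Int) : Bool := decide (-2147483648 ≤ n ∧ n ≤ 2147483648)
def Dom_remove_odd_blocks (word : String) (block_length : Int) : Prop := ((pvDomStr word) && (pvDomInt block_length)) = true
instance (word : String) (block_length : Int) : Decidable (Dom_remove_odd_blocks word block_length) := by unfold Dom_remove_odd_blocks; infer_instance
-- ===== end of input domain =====

-- B replaces A's build-all-blocks + enumerate + index%2 filter by a direct stride
-- over the even block starts (step 2*block_length), joining the slices: simpler.

-- ===== PORT A =====
def remove_odd_blocks (word : String) (block_length : Int) : String :=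
  let word_as_list := word.toList
  let sliced_blocks :=
    (PySem.List.pyRange 0 (word_as_list.length : Int) block_length).map
      (fun i => PySem.List.slice word_as_list (some i) (some (i + block_length)))
  String.ofList ((PySem.List.enumerate sliced_blocks).foldl
      (fun acc p => if PySem.Int.mod p.1 2 = 0 then acc ++ p.2 else acc) [])

-- ===== PORT B =====
def remove_odd_blocks_alt (word : String) (block_length : Int) : String :=
  let l := word.toList
  String.ofList (((PySem.List.pyRange 0 (l.length : Int) (2 * block_length)).map
      (fun i => PySem.List.slice l (some i) (some (i + block_length)))).flatten)

-- ===== PRECONDITION & SPEC =====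
-- Pre_ excludes only block_length = 0, where Python's range(..., 0) raises ValueError in both A and B.
def Pre_remove_odd_blocks (word : String) (block_length : Int) : Prop := block_length ≠ 0
instance (word : String) (block_length : Int) : Decidable (Pre_remove_odd_blocks word block_length) := by unfold Pre_remove_odd_blocks; infer_instance
def pvWitness_remove_odd_blocks : String × Int := ("abcdefghijklm", 3)

def Spec_remove_odd_blocks (word : String) (block_length : Int) (out : String) : Prop := out = remove_odd_blocks_alt word block_length
instance (word : String) (block_length : Int) (out : String) : Decidable (Spec_remove_odd_blocks word block_length out) := by unfold Spec_remove_odd_blocks; infer_instance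

-- ===== CLAIM =====
def Claim_equal_remove_odd_blocks : Prop := ∀ (word : String) (block_length : Int), Dom_remove_odd_blocks word block_length → Pre_remove_odd_blocks word block_length → Spec_remove_odd_blocks word block_length (remove_odd_blocks word block_length)

-- ===== LEMMAS AND PROOFS =====

/-- Every other element of a list, starting with the first. -/
def pvEvens {α : Type} : List α → List α
  | [] => []
  | [x] => [x]
  | x :: _ :: t => x :: pvEvens t

theorem pvEvens_map {α β : Type} (f : α → β) : ∀ (l : List α), pvEvens (l.map f) = (pvEvens l).map f
  | [] => rfl
  | [_] => rfl
  | _ :: _ :: t => by simp [pvEvens, pvEvens_map f t]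

theorem pyRange_pos_nil (a b s : Int) (hs : 0 < s) (h : b ≤ a) : PySem.List.pyRange a b s = [] := by
  rw [PySem.List.pyRange_of_pos a b hs, if_neg (by omega)]
  simp

theorem pyRange_neg_nil (a b s : Int) (hs : s < 0) (h : a ≤ b) : PySem.List.pyRange a b s = [] := by
  rw [PySem.List.pyRange_of_neg a b hs, if_neg (by omega)]
  simp

theorem pyRange_pos_cons (a b s : Int) (hs : 0 < s) (h : a < b) :
    PySem.List.pyRange a b s = a :: PySem.List.pyRange (a + s) b s := by
  rw [PySem.List.pyRange_of_pos a b hs, PySem.List.pyRange_of_pos (a + s) b hs, if_pos h]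
  have hq0 : 0 ≤ (b - a - 1) / s := Int.ediv_nonneg (by omega) (by omega)
  have hcount : ((b - a + s - 1) / s).toNat = ((b - a - 1) / s).toNat + 1 := by
    have : b - a + s - 1 = (b - a - 1) + 1 * s := by ring
    rw [this, Int.add_mul_ediv_right _ _ (by omega : s ≠ 0)]
    omega
  have hcount2 : (if a + s < b then ((b - (a + s) + s - 1) / s).toNat else 0)
      = ((b - a - 1) / s).toNat := by
    split_ifs with h2
    · congr 1; ring_nf
    · have : (b - a - 1) / s = 0 := Int.ediv_eq_zero_of_lt (by omega) (by omega)
      omega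
  rw [hcount, hcount2, List.range_succ_eq_map, List.map_cons, List.map_map]
  congr 1
  · norm_num
  · apply List.map_congr_left
    intro k _
    simp only [Function.comp_apply]
    push_cast
    ring

theorem pvEvens_pyRange (s : Int) (hs : 0 < s) :
    ∀ (n : Nat) (a b : Int), (b - a).toNat ≤ n →
      pvEvens (PySem.List.pyRange a b s) = PySem.List.pyRange a b (2 * s) := by
  intro n
  induction n with
  | zero =>
    intro a b hn
    rw [pyRange_pos_nil a b s hs (by omega), pyRange_pos_nil a b (2 * s) (by omega) (by omega)]
    rfl
  | succ n ih =>
    intro a b hn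
    by_cases hab : a < b
    · rw [pyRange_pos_cons a b s hs hab, pyRange_pos_cons a b (2 * s) (by omega) hab]
      by_cases h2 : a + s < b
      · rw [pyRange_pos_cons (a + s) b s hs h2]
        show a :: pvEvens (PySem.List.pyRange (a + s + s) b s) = _
        rw [ih (a + s + s) b (by omega)]
        norm_num [two_mul]
        congr 1
        ring
      · rw [pyRange_pos_nil (a + s) b s hs (by omega),
            pyRange_pos_nil (a + 2 * s) b (2 * s) (by omega) (by omega)]
        rfl
    · rw [pyRange_pos_nil a b s hs (by omega), pyRange_pos_nil a b (2 * s) (by omega) (by omega)]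
      rfl

theorem pvFoldl_enum_even (xs : List (List Char)) :
    ∀ (init : List Char) (j : Int), PySem.Int.mod j 2 = 0 →
      (PySem.List.enumerate xs j).foldl
        (fun acc p => if PySem.Int.mod p.1 2 = 0 then acc ++ p.2 else acc) init
      = init ++ (pvEvens xs).flatten := by
  induction xs using pvEvens.induct with
  | case1 => intro init j hj; simp [PySem.List.enumerate, pvEvens]
  | case2 x =>
    intro init j hj
    simp only [PySem.List.enumerate, List.foldl_cons, hj, reduceIte, List.foldl_nil]
    simp [pvEvens]
  | case3 x y t ih =>
    intro init j hj
    have hj1 : PySem.Int.mod (j + 1) 2 = 1 := by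
      simp [PySem.Int.mod, Int.fmod_eq_emod] at *; omega
    have hj2 : PySem.Int.mod (j + 1 + 1) 2 = 0 := by
      simp [PySem.Int.mod, Int.fmod_eq_emod] at *; omega
    simp only [PySem.List.enumerate, List.foldl_cons, hj, hj1, reduceIte, one_ne_zero]
    rw [ih (init ++ x) (j + 1 + 1) hj2]
    simp [pvEvens]

-- ===== VERDICT =====
theorem remove_odd_blocks_spec : Claim_equal_remove_odd_blocks := by
  intro word bl _ hpre
  unfold Spec_remove_odd_blocks remove_odd_blocks remove_odd_blocks_alt
  dsimp only
  rcases lt_trichotomy bl 0 with hneg | hz | hpos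
  · rw [pyRange_neg_nil 0 _ bl hneg (Int.natCast_nonneg _),
        pyRange_neg_nil 0 _ (2 * bl) (by omega) (Int.natCast_nonneg _)]
    rfl
  · exact absurd hz hpre
  · have h0 : PySem.Int.mod (0 : Int) 2 = 0 := by decide
    rw [pvFoldl_enum_even _ [] 0 h0, pvEvens_map, pvEvens_pyRange bl hpos
        ((word.toList.length : Int) - 0).toNat 0 (word.toList.length : Int) (le_refl _)]
    rfl
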